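-- pv_equiv track=rewrite | github.com/gentoo/portage | lib/portage/dep/__init__.py | extract_unpack_dependencies
-- ===== SOURCE A (Python) =====
-- def extract_unpack_dependencies(src_uri, unpackers):
-- 	"""
-- 	Return unpack dependencies string for given SRC_URI string.
--
-- 	@param src_uri: SRC_URI string
-- 	@type src_uri: String
-- 	@param unpackers: Dictionary mapping archive suffixes to dependency strings
-- 	@type unpackers: Dictionary
-- 	@rtype: String
-- 	@return: Dependency string specifying packages required to unpack archives.
-- 	"""
-- 	src_uri = src_uri.split()
--
-- 	depend = []
-- 	for i in range(len(src_uri)):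
-- 		if src_uri[i][-1] == "?" or src_uri[i] in ("(", ")"):
-- 			depend.append(src_uri[i])
-- 		elif (i+1 < len(src_uri) and src_uri[i+1] == "->") or src_uri[i] == "->":
-- 			continue
-- 		else:
-- 			for suffix in sorted(unpackers, key=lambda x: len(x), reverse=True):
-- 				suffix = suffix.lower()
-- 				if src_uri[i].lower().endswith(suffix):
-- 					depend.append(unpackers[suffix])
-- 					break
--
-- 	while True:
-- 		cleaned_depend = depend[:]
-- 		for i in range(len(cleaned_depend)):
-- 			if cleaned_depend[i] is None:
-- 				continue
-- 			elif cleaned_depend[i] == "(" and cleaned_depend[i+1] == ")":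
-- 				cleaned_depend[i] = None
-- 				cleaned_depend[i+1] = None
-- 			elif cleaned_depend[i][-1] == "?" and cleaned_depend[i+1] == "(" and cleaned_depend[i+2] == ")":
-- 				cleaned_depend[i] = None
-- 				cleaned_depend[i+1] = None
-- 				cleaned_depend[i+2] = None
-- 		if depend == cleaned_depend:
-- 			break
-- 		else:
-- 			depend = [x for x in cleaned_depend if x is not None]
--
-- 	return " ".join(depend)
-- ===== SOURCE B (Python) =====
-- def extract_unpack_dependencies(src_uri, unpackers):
--     """
--     Return unpack dependencies string for given SRC_URI string.
--
--     Single-pass rewrite: the suffix list is sorted (and lowered) once, hoisted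
--     out of the token loop, and empty use-conditional groups are pruned on the
--     fly with a stack instead of A's repeated whole-list cleaning passes.
--     """
--     tokens = src_uri.split()
--     sufs = [s.lower() for s in sorted(unpackers, key=len, reverse=True)]
--     stack = []
--     for tok, nxt in zip(tokens, tokens[1:] + [""]):
--         if tok[-1] == "?" or tok in ("(", ")"):
--             item = tok
--         elif tok == "->" or nxt == "->":
--             continue
--         else:
--             low = tok.lower()
--             item = None
--             for s in sufs:
--                 if low.endswith(s):
--                     item = unpackers[s]
--                     break
--             if item is None:
--                 continue
--         if item == ")" and stack and stack[-1] == "(":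
--             stack.pop()
--             if stack and stack[-1] and stack[-1][-1] == "?":
--                 stack.pop()
--         else:
--             stack.append(item)
--     return " ".join(stack)
-- ===== Notes on version B (the rewrite author's own statement) =====
-- stated objective: faster
-- what changed: B sorts and lowercases the suffix list once (hoisted out of the token loop) and prunes empty '(...)' / 'use? ( )' groups in a single on-the-fly stack pass, replacing A's per-token re-sorting and its repeated whole-list fixpoint cleaning passes.
-- outside the precondition, e.g. on extract_unpack_dependencies('a? b ( c )', {}): A returns '', B returns ''; on extract_unpack_dependencies('( a.gz', {'.gz': 'u'}): A returns '( u', B returns '( u'; on extract_unpack_dependencies('a.gz ( b )', {'.gz': 'd?'}): A returns '', B returns ''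
import Mathlib
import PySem

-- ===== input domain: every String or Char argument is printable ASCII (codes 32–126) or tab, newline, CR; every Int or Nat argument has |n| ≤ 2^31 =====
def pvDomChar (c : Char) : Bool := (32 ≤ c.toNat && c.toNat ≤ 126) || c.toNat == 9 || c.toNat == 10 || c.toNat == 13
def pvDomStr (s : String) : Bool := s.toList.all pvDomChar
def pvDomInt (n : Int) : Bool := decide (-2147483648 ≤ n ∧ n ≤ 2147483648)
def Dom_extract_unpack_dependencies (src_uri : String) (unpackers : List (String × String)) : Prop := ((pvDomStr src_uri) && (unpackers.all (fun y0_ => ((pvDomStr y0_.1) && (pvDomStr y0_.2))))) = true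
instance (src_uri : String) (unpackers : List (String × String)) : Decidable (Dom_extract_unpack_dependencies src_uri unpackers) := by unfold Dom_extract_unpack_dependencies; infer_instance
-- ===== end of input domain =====

-- B hoists the suffix sort out of the token loop and prunes empty groups with a single
-- on-the-fly stack instead of A's repeated whole-list cleaning passes; return value only.

-- shared leaf helper: Python `s[-1] == "?"` on a possibly-empty string
def pvEndsQ (s : String) : Bool := PySem.Str.pyGet? s (-1) == some '?'

-- ===== PORT A =====
-- sorted(unpackers, key=lambda x: len(x), reverse=True)  (A evaluates this inside the loop)
def pvSortedSuffixes (unpackers : List (String × String)) : List String :=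
  PySem.List.sorted (PySem.Dict.keys (PySem.Dict.mk unpackers)) (fun x => PySem.Str.len x) true

-- inner `for suffix in sorted(...)` loop with break; `unpackers[suffix]` totalized with ""
-- (the KeyError case is excluded by Pre_)
def pvMatchA (tok : String) (unpackers : List (String × String)) : List String → Option String
  | [] => none
  | s :: rest =>
    let s' := PySem.Str.lower s
    if PySem.Str.endswith (PySem.Str.lower tok) s' then
      some (PySem.Dict.getD (PySem.Dict.mk unpackers) s' "")
    else pvMatchA tok unpackers rest

-- first `for i in range(len(src_uri))` loop (lookahead src_uri[i+1] = rest.head?)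
def pvLoopA (unpackers : List (String × String)) : List String → List String
  | [] => []
  | t :: rest =>
    if pvEndsQ t || t == "(" || t == ")" then t :: pvLoopA unpackers rest
    else if rest.head? == some "->" || t == "->" then pvLoopA unpackers rest
    else
      match pvMatchA t unpackers (pvSortedSuffixes unpackers) with
      | some d => d :: pvLoopA unpackers rest
      | none => pvLoopA unpackers rest

-- one cleaning pass over cleaned_depend (None = marked); out-of-range reads are False
-- (the Python IndexError there is excluded by Pre_)
def pvPassA : List (Option String) → List (Option String)
  | [] => []
  | none :: r => none :: pvPassA r
  | [some x] => [some x]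
  | [some x, b] =>
    if x == "(" && b == some ")" then [none, none]
    else some x :: pvPassA [b]
  | some x :: b :: c :: r =>
    if x == "(" && b == some ")" then
      none :: none :: pvPassA (c :: r)
    else if pvEndsQ x && b == some "(" && c == some ")" then
      none :: none :: none :: pvPassA r
    else some x :: pvPassA (b :: c :: r)

-- the `while True` fixpoint loop, with fuel (one unit per pass; each non-final pass
-- strictly shrinks the list, so depend.length + 1 units always suffice)
def pvCleanAFuel : Nat → List String → List String
  | 0, depend => depend
  | fuel + 1, depend =>
    if depend.map some = pvPassA (depend.map some) then depend
    else pvCleanAFuel fuel ((pvPassA (depend.map some)).filterMap id)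

def pvCleanA (depend : List String) : List String :=
  pvCleanAFuel (depend.length + 1) depend

def extract_unpack_dependencies (src_uri : String) (unpackers : List (String × String)) : String :=
  let toks := PySem.Str.split₀ src_uri
  let depend := pvLoopA unpackers toks
  PySem.Str.join " " (pvCleanA depend)

-- ===== PORT B =====
-- push/pop-at-end stack step: prune `( )` (and a preceding `use?`) on the fly
def pvStackStep (st : List String) (item : String) : List String :=
  if item == ")" && st.getLast? == some "(" then
    let st' := st.dropLast
    match st'.getLast? with
    | some t => if t != "" && pvEndsQ t then st'.dropLast else st'
    | none => st'
  else st ++ [item]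

-- first matching (already lowered) suffix, else None
def pvMatchB (tok : String) (unpackers : List (String × String)) : List String → Option String
  | [] => none
  | s :: rest =>
    if PySem.Str.endswith (PySem.Str.lower tok) s then
      some (PySem.Dict.getD (PySem.Dict.mk unpackers) s "")
    else pvMatchB tok unpackers rest

-- body of B's single loop: the item this token contributes, if any
def pvItemB (tok nxt : String) (sufs : List String) (unpackers : List (String × String)) :
    Option String :=
  if pvEndsQ tok || tok == "(" || tok == ")" then some tok
  else if tok == "->" || nxt == "->" then none
  else pvMatchB tok unpackers sufs

-- loop body of B: skip tokens contributing no item, else do the stack update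
def pvStepB (sufs : List String) (unpackers : List (String × String))
    (st : List String) (p : String × String) : List String :=
  match pvItemB p.1 p.2 sufs unpackers with
  | none => st
  | some item => pvStackStep st item

def extract_unpack_dependencies_alt (src_uri : String) (unpackers : List (String × String)) :
    String :=
  let toks := PySem.Str.split₀ src_uri
  let sufs := (PySem.List.sorted (PySem.Dict.keys (PySem.Dict.mk unpackers))
      (fun x => PySem.Str.len x) true).map PySem.Str.lower
  let stack := (toks.zip (toks.drop 1 ++ [""])).foldl (pvStepB sufs unpackers) []
  PySem.Str.join " " stack

-- ===== PRECONDITION & SPEC =====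
-- every `use?` token immediately followed by "(", no dangling one at the end
def pvQF : List String → Bool
  | [] => true
  | [t] => !pvEndsQ t
  | t :: t' :: r => (!pvEndsQ t || t' == "(") && pvQF (t' :: r)

-- every "(" token is matched by a later ")" token (extra ")" tokens are harmless)
def pvClampBal (c : Nat) : List String → Bool
  | [] => c == 0
  | t :: r =>
    if t == "(" then pvClampBal (c + 1) r
    else if t == ")" then pvClampBal (c - 1) r
    else pvClampBal c r

-- a dependency string that cannot be mistaken for group syntax by the cleaning loop
def pvSafeVal (v : String) : Bool := !(v == "") && !(v == "(") && !(v == ")") && !pvEndsQ v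

-- Pre_ is a conservative well-formedness condition: it excludes the inputs where A raises
-- (IndexError of the cleaning passes on a dangling "use?" token, an unmatched "(", or a
-- syntax-like dependency string attached to a suffix that actually matches a token;
-- KeyError on an unpacker key whose lowercased form is absent although it matches a token)
-- together with some syntactically malformed SRC_URI strings on which A still returns an
-- accidental value.
def Pre_extract_unpack_dependencies (src_uri : String) (unpackers : List (String × String)) : Prop :=
  pvQF (PySem.Str.split₀ src_uri) = true ∧
  pvClampBal 0 (PySem.Str.split₀ src_uri) = true ∧
  unpackers.all (fun kv =>
    !((PySem.Str.split₀ src_uri).any (fun t =>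
        PySem.Str.endswith (PySem.Str.lower t) kv.1)) || pvSafeVal kv.2) = true ∧
  unpackers.all (fun kv =>
    (PySem.Str.split₀ src_uri).all (fun t =>
      !(PySem.Str.endswith (PySem.Str.lower t) (PySem.Str.lower kv.1)) ||
        (PySem.Dict.get? (PySem.Dict.mk unpackers) (PySem.Str.lower kv.1)).isSome)) = true
instance (src_uri : String) (unpackers : List (String × String)) :
    Decidable (Pre_extract_unpack_dependencies src_uri unpackers) := by
  unfold Pre_extract_unpack_dependencies; infer_instance

def pvWitness_extract_unpack_dependencies : String × (List (String × String)) :=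
  ("foo? ( http://x/a.tar.gz -> a.tgz ) b.ZIP", [(".tar.gz", "app-arch/tar"), (".zip", "app-arch/unzip"), (".tgz", "app-arch/tar")])

def Spec_extract_unpack_dependencies (src_uri : String) (unpackers : List (String × String)) (out : String) : Prop := out = extract_unpack_dependencies_alt src_uri unpackers
instance (src_uri : String) (unpackers : List (String × String)) (out : String) : Decidable (Spec_extract_unpack_dependencies src_uri unpackers out) := by unfold Spec_extract_unpack_dependencies; infer_instance

-- ===== CLAIM (what is proved, stated in full; the proofs are below) =====
def Claim_equal_extract_unpack_dependencies : Prop := ∀ (src_uri : String) (unpackers : List (String × String)), Dom_extract_unpack_dependencies src_uri unpackers → Pre_extract_unpack_dependencies src_uri unpackers → Spec_extract_unpack_dependencies src_uri unpackers (extract_unpack_dependencies src_uri unpackers)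

-- ===== LEMMAS AND PROOFS =====

theorem pvPassA_cons_some (x : String) (r : List (Option String)) :
    pvPassA (some x :: r) =
      if x == "(" && r.head? == some (some ")") then none :: none :: pvPassA r.tail
      else if pvEndsQ x && r.head? == some (some "(")
          && r.tail.head? == some (some ")") then
        none :: none :: none :: pvPassA r.tail.tail
      else some x :: pvPassA r := by
  match r with
  | [] => simp [pvPassA]
  | [b] =>
    have hL : pvPassA [some x, b]
        = if x == "(" && b == some ")" then [none, none] else some x :: pvPassA [b] := rfl
    have e1 : (([b] : List (Option String)).head? == some (some ")")) = (b == some ")") := by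
      simp
    rw [hL, e1]
    simp only [List.tail_cons, List.head?_nil]
    by_cases h1 : (x == "(" && b == some ")") = true
    · rw [if_pos h1, if_pos h1]
      rfl
    · rw [if_neg h1, if_neg h1, if_neg (by simp)]
  | b :: c :: r2 =>
    have hL : pvPassA (some x :: b :: c :: r2)
        = if x == "(" && b == some ")" then none :: none :: pvPassA (c :: r2)
          else if pvEndsQ x && b == some "(" && c == some ")" then
            none :: none :: none :: pvPassA r2
          else some x :: pvPassA (b :: c :: r2) := rfl
    have e1 : ((b :: c :: r2).head? == some (some ")")) = (b == some ")") := by simp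
    have e2 : ((b :: c :: r2).head? == some (some "(")) = (b == some "(") := by simp
    have e3 : ((b :: c :: r2).tail.head? == some (some ")")) = (c == some ")") := by simp
    rw [hL, e1, e2, e3]
    simp only [List.tail_cons]

theorem pvPassA_le (l : List (Option String)) :
    ((pvPassA l).filterMap id).length ≤ (l.filterMap id).length := by
  induction l using pvPassA.induct with
  | case1 => simp [pvPassA]
  | case2 r ih => simpa [pvPassA] using ih
  | case3 x => simp [pvPassA]
  | case4 x b h =>
    obtain ⟨rfl, rfl⟩ : x = "(" ∧ b = some ")" := by simpa using h
    simp [pvPassA]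
  | case5 x b h ih =>
    rw [show pvPassA [some x, b]
        = if x == "(" && b == some ")" then [none, none] else some x :: pvPassA [b] from rfl,
      if_neg h]
    simpa using ih
  | case6 x b c r h ih =>
    obtain ⟨rfl, rfl⟩ : x = "(" ∧ b = some ")" := by simpa using h
    rw [show pvPassA (some "(" :: some ")" :: c :: r)
        = none :: none :: pvPassA (c :: r) from rfl]
    simp at ih ⊢
    omega
  | case7 x b c r h1 h2 ih =>
    obtain ⟨⟨hq, rfl⟩, rfl⟩ : (pvEndsQ x = true ∧ b = some "(") ∧ c = some ")" := by
      simpa using h2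
    rw [show pvPassA (some x :: some "(" :: some ")" :: r)
        = if x == "(" && some "(" == some ")" then none :: none :: pvPassA (some ")" :: r)
          else if pvEndsQ x && some "(" == some "(" && some ")" == some ")" then
            none :: none :: none :: pvPassA r
          else some x :: pvPassA (some "(" :: some ")" :: r) from rfl,
      if_neg h1, if_pos (by simp [hq])]
    simp at ih ⊢
    omega
  | case8 x b c r h1 h2 ih =>
    rw [show pvPassA (some x :: b :: c :: r)
        = if x == "(" && b == some ")" then none :: none :: pvPassA (c :: r)
          else if pvEndsQ x && b == some "(" && c == some ")" then
            none :: none :: none :: pvPassA r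
          else some x :: pvPassA (b :: c :: r) from rfl, if_neg h1, if_neg h2]
    simpa using ih

theorem pvPassA_shrink' (l : List (Option String)) (h : pvPassA l ≠ l) :
    ((pvPassA l).filterMap id).length < (l.filterMap id).length := by
  induction l using pvPassA.induct with
  | case1 => simp [pvPassA] at h
  | case2 r ih =>
    rw [show pvPassA (none :: r) = none :: pvPassA r from rfl] at h ⊢
    have hr : pvPassA r ≠ r := by intro he; exact h (by rw [he])
    simpa using ih hr
  | case3 x => rw [show pvPassA [some x] = [some x] from rfl] at h; simp at h
  | case4 x b h0 =>
    obtain ⟨rfl, rfl⟩ : x = "(" ∧ b = some ")" := by simpa using h0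
    rw [show pvPassA [some "(", some ")"] = [none, none] from rfl]
    simp
  | case5 x b h0 ih =>
    rw [show pvPassA [some x, b]
        = if x == "(" && b == some ")" then [none, none] else some x :: pvPassA [b] from rfl,
      if_neg h0] at h ⊢
    have hr : pvPassA [b] ≠ [b] := by intro he; exact h (by rw [he])
    simpa using ih hr
  | case6 x b c r h0 ih =>
    obtain ⟨rfl, rfl⟩ : x = "(" ∧ b = some ")" := by simpa using h0
    rw [show pvPassA (some "(" :: some ")" :: c :: r)
        = none :: none :: pvPassA (c :: r) from rfl]
    have := pvPassA_le (c :: r)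
    simp at this ⊢
    omega
  | case7 x b c r h1 h2 ih =>
    obtain ⟨⟨hq, rfl⟩, rfl⟩ : (pvEndsQ x = true ∧ b = some "(") ∧ c = some ")" := by
      simpa using h2
    rw [show pvPassA (some x :: some "(" :: some ")" :: r)
        = if x == "(" && some "(" == some ")" then none :: none :: pvPassA (some ")" :: r)
          else if pvEndsQ x && some "(" == some "(" && some ")" == some ")" then
            none :: none :: none :: pvPassA r
          else some x :: pvPassA (some "(" :: some ")" :: r) from rfl,
      if_neg h1, if_pos (by simp [hq])]
    have := pvPassA_le r
    simp at this ⊢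
    omega
  | case8 x b c r h1 h2 ih =>
    rw [show pvPassA (some x :: b :: c :: r)
        = if x == "(" && b == some ")" then none :: none :: pvPassA (c :: r)
          else if pvEndsQ x && b == some "(" && c == some ")" then
            none :: none :: none :: pvPassA r
          else some x :: pvPassA (b :: c :: r) from rfl, if_neg h1, if_neg h2] at h ⊢
    have hr : pvPassA (b :: c :: r) ≠ b :: c :: r := by intro he; exact h (by rw [he])
    simpa using ih hr

theorem pvPassA_shrink (E : List String) (h : pvPassA (E.map some) ≠ E.map some) :
    ((pvPassA (E.map some)).filterMap id).length < E.length := by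
  have := pvPassA_shrink' (E.map some) h
  simpa using this


-- proof-side model of one cleaning pass: delete the disjoint matches directly
def pvDel : List String → List String
  | [] => []
  | x :: rest =>
    if pvEndsQ x && rest.head? == some "(" && rest.tail.head? == some ")" then
      pvDel rest.tail.tail
    else if x == "(" && rest.head? == some ")" then
      pvDel rest.tail
    else x :: pvDel rest
termination_by l => l.length
decreasing_by all_goals (simp only [List.length_tail, List.length_cons]; omega)

-- proof-side stack step on a reversed stack (head = top of stack)
def pvRStep (st : List String) (item : String) : List String :=
  if item == ")" && st.head? == some "(" then
    match st.tail with
    | t :: r => if t != "" && pvEndsQ t then r else t :: r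
    | [] => []
  else item :: st

-- no two adjacent "?"-ending entries
def pvNoQQ : List String → Bool
  | a :: b :: r => !(pvEndsQ a && pvEndsQ b) && pvNoQQ (b :: r)
  | _ => true

-- stack invariant: top does not end in "?", no two adjacent "?"-entries
def pvStOk (st : List String) : Bool :=
  (match st.head? with | some t => !pvEndsQ t | none => true) && pvNoQQ st

theorem pvEndsQ_ne_empty {x : String} (h : pvEndsQ x = true) : (x != "") = true := by
  rcases eq_or_ne x "" with rfl | hne
  · exact absurd h (by decide)
  · simpa using hne

theorem pvEndsQ_ne_rparen {x : String} (h : pvEndsQ x = true) : (x == ")") = false := by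
  rcases eq_or_ne x ")" with rfl | hne
  · exact absurd h (by decide)
  · simpa using hne

theorem pvEndsQ_ne_lparen {x : String} (h : pvEndsQ x = true) : (x == "(") = false := by
  rcases eq_or_ne x "(" with rfl | hne
  · exact absurd h (by decide)
  · simpa using hne

theorem pvQF_tail {t : String} {r : List String} (h : pvQF (t :: r) = true) : pvQF r = true := by
  cases r with
  | nil => simp [pvQF]
  | cons a r' => rw [pvQF] at h; exact Bool.and_elim_right h

theorem pvQF_head_q {t : String} {r : List String} (h : pvQF (t :: r) = true)
    (hq : pvEndsQ t = true) : r.head? = some "(" := by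
  cases r with
  | nil => rw [pvQF] at h; simp [hq] at h
  | cons a r' =>
    rw [pvQF] at h
    have h1 := Bool.and_elim_left h
    simp [hq] at h1
    simp [h1]

theorem pvQF_cons_notq {x : String} {l : List String} (hx : pvEndsQ x = false) :
    pvQF (x :: l) = pvQF l := by
  cases l with
  | nil => simp [pvQF, hx]
  | cons a r => rw [pvQF]; simp [hx]

theorem pvDel_le (E : List String) : (pvDel E).length ≤ E.length := by
  induction E using pvDel.induct with
  | case1 => simp [pvDel]
  | case2 x rest h ih =>
    rw [pvDel]; simp only [h, if_true]
    exact le_trans ih (by cases rest with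
      | nil => simp
      | cons a r => cases r <;> simp <;> omega)
  | case3 x rest h1 h2 ih =>
    rw [pvDel]; simp only [h1, h2, if_true]
    exact le_trans ih (by cases rest <;> simp <;> omega)
  | case4 x rest h1 h2 ih =>
    rw [pvDel]; simp only [h1, h2, if_false]
    simpa using ih

-- 1. one pass of A is exactly pvDel
theorem pvPassA_eq_del (E : List String) :
    (pvPassA (E.map some)).filterMap id = pvDel E := by
  induction E using pvDel.induct with
  | case1 => simp [pvPassA, pvDel]
  | case2 x rest h ih =>
    obtain ⟨hq, hh1, hh2⟩ :
        pvEndsQ x = true ∧ rest.head? = some "(" ∧ rest.tail.head? = some ")" := by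
      have ha := Bool.and_elim_left (Bool.and_elim_left h)
      have hb := Bool.and_elim_right (Bool.and_elim_left h)
      have hc := Bool.and_elim_right h
      exact ⟨ha, by simpa using hb, by simpa using hc⟩
    rw [pvDel]; simp only [h, if_true]
    rw [List.map_cons, pvPassA_cons_some]
    have hx1 : (x == "(") = false := pvEndsQ_ne_lparen hq
    simp only [hx1, Bool.false_and, Bool.false_eq_true, if_false]
    have hc2 : (pvEndsQ x && (rest.map some).head? == some (some "(")
        && (rest.map some).tail.head? == some (some ")")) = true := by
      simp [hq, List.head?_map, hh1, ← List.map_tail, hh2]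
    rw [if_pos hc2]
    simp only [← List.map_tail]
    simpa using ih
  | case3 x rest h1 h2 ih =>
    obtain ⟨rfl, hh1⟩ : x = "(" ∧ rest.head? = some ")" := by
      have ha := Bool.and_elim_left h2
      have hb := Bool.and_elim_right h2
      exact ⟨by simpa using ha, by simpa using hb⟩
    rw [pvDel]; simp only [h1, h2, if_false, if_true]
    rw [List.map_cons, pvPassA_cons_some]
    have hc1 : (("(" : String) == "(" && (rest.map some).head? == some (some ")")) = true := by
      simp [List.head?_map, hh1]
    rw [if_pos hc1]
    simp only [← List.map_tail]
    simpa using ih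
  | case4 x rest h1 h2 ih =>
    rw [pvDel]; simp only [h1, h2, if_false]
    rw [List.map_cons, pvPassA_cons_some]
    have hc1 : (x == "(" && (rest.map some).head? == some (some ")")) = false := by
      rcases Bool.eq_false_or_eq_true (x == "(" && (rest.map some).head? == some (some ")"))
        with hx | hx
      · exfalso
        apply h2
        have ha := Bool.and_elim_left hx
        have hb := Bool.and_elim_right hx
        have hb' : rest.head? = some ")" := by
          cases hb0 : rest.head? with
          | none => rw [List.head?_map, hb0] at hb; simp at hb
          | some v =>
            rw [List.head?_map, hb0] at hb
            have : v = ")" := by simpa using hb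
            rw [this]
        simp [ha, hb']
      · exact hx
    have hc2 : (pvEndsQ x && (rest.map some).head? == some (some "(")
        && (rest.map some).tail.head? == some (some ")")) = false := by
      rcases Bool.eq_false_or_eq_true (pvEndsQ x && (rest.map some).head? == some (some "(")
        && (rest.map some).tail.head? == some (some ")")) with hx | hx
      · exfalso
        apply h1
        have ha := Bool.and_elim_left (Bool.and_elim_left hx)
        have hb := Bool.and_elim_right (Bool.and_elim_left hx)
        have hc := Bool.and_elim_right hx
        have hb' : rest.head? = some "(" := by
          cases hb0 : rest.head? with
          | none => rw [List.head?_map, hb0] at hb; simp at hb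
          | some v =>
            rw [List.head?_map, hb0] at hb
            have : v = "(" := by simpa using hb
            rw [this]
        have hc' : rest.tail.head? = some ")" := by
          rw [← List.map_tail] at hc
          cases hc0 : rest.tail.head? with
          | none => rw [List.head?_map, hc0] at hc; simp at hc
          | some v =>
            rw [List.head?_map, hc0] at hc
            have : v = ")" := by simpa using hc
            rw [this]
        simp [ha, hb', hc']
      · exact hx
    rw [if_neg (by intro hcc; rw [hcc] at hc1; simp at hc1),
        if_neg (by intro hcc; rw [hcc] at hc2; simp at hc2)]
    simpa using ih

-- 3. the pass changes nothing iff pvDel does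
theorem pvPassA_id_iff (E : List String) :
    pvPassA (E.map some) = E.map some ↔ pvDel E = E := by
  constructor
  · intro h
    have := pvPassA_eq_del E
    rw [h] at this
    simpa using this.symm
  · intro h
    by_contra hne
    have := pvPassA_shrink' (E.map some) hne
    have h2 := pvPassA_eq_del E
    rw [h2, h] at this
    simp at this

-- 5. an adjacent "( )" makes pvDel shrink
theorem pvDel_pairShrink (u v : List String) :
    (pvDel (u ++ "(" :: ")" :: v)).length < (u ++ "(" :: ")" :: v).length := by
  induction u with
  | nil =>
    rw [List.nil_append, pvDel]
    have hq : pvEndsQ "(" = false := by decide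
    rw [if_neg (by simp [hq]), if_pos (by simp)]
    have := pvDel_le ((")" :: v).tail)
    simp at this ⊢
    omega
  | cons a u ih =>
    rw [List.cons_append, pvDel]
    by_cases hc1 : (pvEndsQ a && (u ++ "(" :: ")" :: v).head? == some "(" &&
        (u ++ "(" :: ")" :: v).tail.head? == some ")") = true
    · rw [if_pos hc1]
      have h1 := pvDel_le ((u ++ "(" :: ")" :: v).tail.tail)
      simp only [List.length_tail, List.length_append, List.length_cons] at h1 ⊢
      omega
    · rw [if_neg hc1]
      by_cases hc2 : (a == "(" && (u ++ "(" :: ")" :: v).head? == some ")") = true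
      · rw [if_pos hc2]
        have h1 := pvDel_le ((u ++ "(" :: ")" :: v).tail)
        simp only [List.length_tail, List.length_append, List.length_cons] at h1 ⊢
        omega
      · rw [if_neg hc2]
        simpa using ih

theorem pvQF_tail' {l : List String} (h : pvQF l = true) : pvQF l.tail = true := by
  cases l with
  | nil => simpa using h
  | cons a r => exact pvQF_tail h

-- 6. pvQF is preserved by pvDel
theorem pvQF_del (E : List String) (h : pvQF E = true) : pvQF (pvDel E) = true := by
  induction E using pvDel.induct with
  | case1 => simpa [pvDel] using h
  | case2 x rest hc ih =>
    rw [pvDel, if_pos hc]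
    exact ih (pvQF_tail' (pvQF_tail' (pvQF_tail h)))
  | case3 x rest hc1 hc2 ih =>
    rw [pvDel, if_neg hc1, if_pos hc2]
    exact ih (pvQF_tail' (pvQF_tail h))
  | case4 x rest hc1 hc2 ih =>
    rw [pvDel, if_neg hc1, if_neg hc2]
    have hrest := pvQF_tail (t := x) h
    by_cases hq : pvEndsQ x = true
    · have hh := pvQF_head_q h hq
      cases rest with
      | nil => simp at hh
      | cons a rest2 =>
        obtain rfl : a = "(" := by simpa using hh
        have hr2 : ("(" == "(" && rest2.head? == some ")") = false := by
          rcases Bool.eq_false_or_eq_true (("(" : String) == "(" && rest2.head? == some ")")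
            with ht | hf
          · exfalso
            apply hc1
            have := Bool.and_elim_right ht
            simp [hq, this]
          · exact hf
        have hstep : pvDel ("(" :: rest2) = "(" :: pvDel rest2 := by
          rw [pvDel, if_neg (by simp [show pvEndsQ "(" = false from by decide]),
              if_neg (by intro hcc; rw [hcc] at hr2; simp at hr2)]
        rw [hstep, pvQF]
        have h2 := ih hrest
        rw [hstep] at h2
        simp [h2]
    · have hq' : pvEndsQ x = false := by simpa using hq
      rw [pvQF_cons_notq hq']
      exact ih hrest

theorem pvNoQQ_cons_cons (a b : String) (r : List String) :
    pvNoQQ (a :: b :: r) = (!(pvEndsQ a && pvEndsQ b) && pvNoQQ (b :: r)) := by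
  rw [pvNoQQ]

theorem pvStOk_head {a : String} {r : List String} (h : pvStOk (a :: r) = true) :
    pvEndsQ a = false := by
  simp only [pvStOk, List.head?] at h
  have := Bool.and_elim_left h
  simpa using this

theorem pvStOk_noQQ {a : String} {r : List String} (h : pvStOk (a :: r) = true) :
    pvNoQQ (a :: r) = true := by
  simp only [pvStOk, List.head?] at h
  exact Bool.and_elim_right h

theorem pvNoQQ_tail {a : String} {r : List String} (h : pvNoQQ (a :: r) = true) :
    pvNoQQ r = true := by
  cases r with
  | nil => rfl
  | cons b r' => rw [pvNoQQ_cons_cons] at h; exact Bool.and_elim_right h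

theorem pvStOk_of {a : String} {r : List String} (ha : pvEndsQ a = false)
    (hn : pvNoQQ (a :: r) = true) : pvStOk (a :: r) = true := by
  simp only [pvStOk, List.head?]
  simp [ha, hn]

theorem pvStOk_push {x : String} {st : List String} (hx : pvEndsQ x = false)
    (h : pvStOk st = true) : pvStOk (x :: st) = true := by
  apply pvStOk_of hx
  cases st with
  | nil => rfl
  | cons a r =>
    rw [pvNoQQ_cons_cons]
    simp [hx, pvStOk_noQQ h]

theorem pvStOk_paren_push (x : String) (st : List String) (h : pvStOk st = true) :
    pvStOk ("(" :: x :: st) = true := by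
  apply pvStOk_of (by decide)
  rw [pvNoQQ_cons_cons]
  have hp : pvEndsQ "(" = false := by decide
  simp only [hp, Bool.false_and, Bool.not_false, Bool.true_and]
  cases st with
  | nil => rfl
  | cons a r =>
    rw [pvNoQQ_cons_cons]
    simp [pvStOk_head h, pvStOk_noQQ h]

theorem pvRStep_push_notR {st : List String} {x : String} (hx : (x == ")") = false) :
    pvRStep st x = x :: st := by
  unfold pvRStep
  rw [if_neg (by intro hcc; have := Bool.and_elim_left hcc; rw [this] at hx; simp at hx)]

theorem pvRStep_pop_nil : pvRStep ["("] ")" = [] := by rfl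

theorem pvRStep_pop_q (t : String) (r : List String) (ht : pvEndsQ t = true) :
    pvRStep ("(" :: t :: r) ")" = r := by
  unfold pvRStep
  rw [if_pos (by simp)]
  show (if (t != "" && pvEndsQ t) = true then r else t :: r) = r
  rw [if_pos (by simp [pvEndsQ_ne_empty ht, ht])]

theorem pvRStep_pop_notq (t : String) (r : List String) (ht : pvEndsQ t = false) :
    pvRStep ("(" :: t :: r) ")" = t :: r := by
  unfold pvRStep
  rw [if_pos (by simp)]
  show (if (t != "" && pvEndsQ t) = true then r else t :: r) = t :: r
  rw [if_neg (by simp [ht])]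

theorem pvRStep_stOk {st : List String} {item : String} (h : pvStOk st = true)
    (hi : pvEndsQ item = false) : pvStOk (pvRStep st item) = true := by
  by_cases hc : (item == ")" && st.head? == some "(") = true
  · obtain rfl : item = ")" := by simpa using Bool.and_elim_left hc
    cases st with
    | nil => simp at hc
    | cons a st' =>
      obtain rfl : a = "(" := by simpa using Bool.and_elim_right hc
      cases st' with
      | nil => rw [pvRStep_pop_nil]; rfl
      | cons t r =>
        have hnq := pvNoQQ_tail (pvStOk_noQQ h)
        by_cases ht : pvEndsQ t = true
        · rw [pvRStep_pop_q t r ht]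
          cases r with
          | nil => rfl
          | cons b r' =>
            rw [pvNoQQ_cons_cons] at hnq
            have h1 := Bool.and_elim_left hnq
            have hb : pvEndsQ b = false := by
              rcases Bool.eq_false_or_eq_true (pvEndsQ b) with h2 | h2
              · rw [ht, h2] at h1; simp at h1
              · exact h2
            exact pvStOk_of hb (pvNoQQ_tail hnq)
        · have ht' : pvEndsQ t = false := by simpa using ht
          rw [pvRStep_pop_notq t r ht']
          exact pvStOk_of ht' hnq
  · unfold pvRStep
    rw [if_neg hc]
    exact pvStOk_push hi h

-- 7. the stack run does not see a pvDel step
theorem pvRStep_del_aux : ∀ (n : Nat) (E : List String), E.length ≤ n →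
    ∀ st : List String, pvQF E = true → pvStOk st = true →
    (pvDel E).foldl pvRStep st = E.foldl pvRStep st := by
  intro n
  induction n with
  | zero =>
    intro E hlen st _ _
    have : E = [] := by cases E <;> simp at hlen ⊢
    subst this; simp [pvDel]
  | succ n ih =>
    intro E hlen st hqf hst
    cases E with
    | nil => simp [pvDel]
    | cons x rest =>
      rw [pvDel]
      by_cases hc1 : (pvEndsQ x && rest.head? == some "(" && rest.tail.head? == some ")") = true
      · rw [if_pos hc1]
        have hq : pvEndsQ x = true := Bool.and_elim_left (Bool.and_elim_left hc1)
        have hh1 : rest.head? = some "(" := by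
          simpa using Bool.and_elim_right (Bool.and_elim_left hc1)
        have hh2 : rest.tail.head? = some ")" := by simpa using Bool.and_elim_right hc1
        cases rest with
        | nil => simp at hh1
        | cons a rest2 =>
          obtain rfl : a = "(" := by simpa using hh1
          cases rest2 with
          | nil => simp at hh2
          | cons b rest3 =>
            obtain rfl : b = ")" := by simpa using hh2
            simp only [List.foldl_cons, List.tail]
            rw [pvRStep_push_notR (pvEndsQ_ne_rparen hq),
                show pvRStep (x :: st) "(" = "(" :: x :: st from pvRStep_push_notR (by decide),
                pvRStep_pop_q x st hq]
            apply ih rest3 (by simp at hlen; omega) st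
              (pvQF_tail' (pvQF_tail' (pvQF_tail hqf))) hst
      · rw [if_neg hc1]
        by_cases hc2 : (x == "(" && rest.head? == some ")") = true
        · rw [if_pos hc2]
          obtain rfl : x = "(" := by simpa using Bool.and_elim_left hc2
          have hh1 : rest.head? = some ")" := by simpa using Bool.and_elim_right hc2
          cases rest with
          | nil => simp at hh1
          | cons a rest2 =>
            obtain rfl : a = ")" := by simpa using hh1
            have s2 : pvRStep ("(" :: st) ")" = st := by
              cases st with
              | nil => exact pvRStep_pop_nil
              | cons t r => exact pvRStep_pop_notq t r (pvStOk_head hst)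
            simp only [List.foldl_cons, List.tail]
            rw [show pvRStep st "(" = "(" :: st from pvRStep_push_notR (by decide), s2]
            exact ih rest2 (by simp at hlen; omega) st (pvQF_tail' (pvQF_tail hqf)) hst
        · rw [if_neg hc2]
          by_cases hq : pvEndsQ x = true
          · have hh := pvQF_head_q hqf hq
            cases rest with
            | nil => simp at hh
            | cons a rest2 =>
              obtain rfl : a = "(" := by simpa using hh
              have hr2 : (rest2.head? == some ")") = false := by
                rcases Bool.eq_false_or_eq_true (rest2.head? == some ")") with h1 | h1
                · exfalso; apply hc1; simp [hq]; simpa using h1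
                · exact h1
              have hstep : pvDel ("(" :: rest2) = "(" :: pvDel rest2 := by
                rw [pvDel, if_neg (by simp [show pvEndsQ "(" = false from by decide]),
                    if_neg (by
                      intro hcc
                      have := Bool.and_elim_right hcc
                      rw [this] at hr2; simp at hr2)]
              rw [hstep]
              simp only [List.foldl_cons]
              rw [pvRStep_push_notR (pvEndsQ_ne_rparen hq),
                  show pvRStep (x :: st) "(" = "(" :: x :: st from pvRStep_push_notR (by decide)]
              exact ih rest2 (by simp at hlen; omega) ("(" :: x :: st)
                (pvQF_tail' (pvQF_tail hqf)) (pvStOk_paren_push x st hst)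
          · have hq' : pvEndsQ x = false := by simpa using hq
            simp only [List.foldl_cons]
            exact ih rest (by simp at hlen; omega) (pvRStep st x) (pvQF_tail hqf)
              (pvRStep_stOk hst hq')

theorem pvRStep_del (E : List String) : ∀ st : List String, pvQF E = true → pvStOk st = true →
    (pvDel E).foldl pvRStep st = E.foldl pvRStep st := by
  intro st h1 h2
  exact pvRStep_del_aux E.length E le_rfl st h1 h2

-- 8. on a pvDel-fixed list the stack run is the identity
theorem pvRStep_fixed (v u : List String) (h : pvDel (u ++ v) = u ++ v) :
    v.foldl pvRStep u.reverse = (u ++ v).reverse := by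
  induction v generalizing u with
  | nil => simp
  | cons c v' ih =>
    have hstep : pvRStep u.reverse c = c :: u.reverse := by
      by_cases hc : (c == ")" && u.reverse.head? == some "(") = true
      · exfalso
        obtain rfl : c = ")" := by simpa using Bool.and_elim_left hc
        have hr : u.reverse.head? = some "(" := by simpa using Bool.and_elim_right hc
        cases hu : u.reverse with
        | nil => rw [hu] at hr; simp at hr
        | cons a t =>
          rw [hu] at hr
          have ha : a = "(" := by simpa using hr
          subst ha
          have hu2 : u = t.reverse ++ ["("] := by
            have := congrArg List.reverse hu
            simpa using this
          have hsh := pvDel_pairShrink t.reverse v'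
          rw [hu2] at h
          have : t.reverse ++ ["("] ++ ")" :: v' = t.reverse ++ "(" :: ")" :: v' := by simp
          rw [this] at h
          rw [h] at hsh
          simp at hsh
      · unfold pvRStep; rw [if_neg hc]
    simp only [List.foldl_cons, hstep]
    have hrw : c :: u.reverse = (u ++ [c]).reverse := by simp
    rw [hrw, ih (u ++ [c]) (by rw [List.append_assoc]; simpa using h)]
    simp

theorem pvStOk_nil : pvStOk [] = true := by rfl

-- 9. A's fixpoint cleaning equals the stack run
theorem pvCleanAFuel_eq_stack : ∀ (fuel : Nat) (E : List String), E.length < fuel →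
    pvQF E = true → pvCleanAFuel fuel E = (E.foldl pvRStep []).reverse := by
  intro fuel
  induction fuel with
  | zero => intro E hlen _; omega
  | succ fuel ih =>
    intro E hlen h
    rw [pvCleanAFuel]
    by_cases hfix : E.map some = pvPassA (E.map some)
    · rw [if_pos hfix]
      have hdel : pvDel E = E := (pvPassA_id_iff E).mp hfix.symm
      have := pvRStep_fixed E [] (by simpa using hdel)
      simp only [List.reverse_nil] at this
      rw [this]
      simp
    · rw [if_neg hfix]
      have hsh := pvPassA_shrink E (fun hh => hfix hh.symm)
      rw [pvPassA_eq_del]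
      rw [ih (pvDel E) (by rw [← pvPassA_eq_del]; omega) (pvQF_del E h)]
      rw [pvRStep_del E [] h pvStOk_nil]

theorem pvCleanA_eq_stack (E : List String) (h : pvQF E = true) :
    pvCleanA E = (E.foldl pvRStep []).reverse := by
  rw [pvCleanA]
  exact pvCleanAFuel_eq_stack (E.length + 1) E (by omega) h

theorem pvDropLast_rev (l : List String) : l.reverse.dropLast = l.tail.reverse := by
  cases l <;> simp

-- 10/11. B's push/pop-at-end stack is the reversed pvRStep stack
theorem pvStackStep_rev' (l : List String) (item : String) :
    pvStackStep l.reverse item = (pvRStep l item).reverse := by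
  unfold pvStackStep pvRStep
  rw [List.getLast?_reverse]
  by_cases hc : (item == ")" && l.head? == some "(") = true
  · rw [if_pos hc, if_pos hc]
    cases l with
    | nil => simp at hc
    | cons a t =>
      simp only [pvDropLast_rev, List.tail, List.getLast?_reverse]
      cases t with
      | nil => simp
      | cons b r =>
        simp only [List.head?]
        by_cases hb : (b != "" && pvEndsQ b) = true
        · rw [if_pos hb, if_pos hb]
        · rw [if_neg hb, if_neg hb]
  · rw [if_neg hc, if_neg hc]
    simp

theorem pvStackStep_rev (st : List String) (item : String) :
    pvStackStep st item = (pvRStep st.reverse item).reverse := by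
  have := pvStackStep_rev' st.reverse item
  simpa using this

theorem foldl_stackStep_rev (E : List String) : ∀ st : List String,
    E.foldl pvStackStep st = (E.foldl pvRStep st.reverse).reverse := by
  induction E with
  | nil => intro st; simp
  | cons c E' ih =>
    intro st
    simp only [List.foldl_cons]
    rw [pvStackStep_rev st c, ih ((pvRStep st.reverse c).reverse)]
    simp

-- 12. folding with an Option-producing body is a fold over filterMap
theorem foldl_stepB_filterMap (sufs : List String) (unpackers : List (String × String))
    (l : List (String × String)) : ∀ init : List String,
    l.foldl (pvStepB sufs unpackers) init
      = (l.filterMap (fun p => pvItemB p.1 p.2 sufs unpackers)).foldl pvStackStep init := by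
  induction l with
  | nil => intro init; simp
  | cons a l ih =>
    intro init
    rw [List.foldl_cons, List.filterMap_cons]
    unfold pvStepB
    cases h : pvItemB a.1 a.2 sufs unpackers
    · simp only []
      exact ih init
    · simp only []
      exact ih _

-- 13. A's first loop emits exactly B's per-pair items
theorem pvMatchA_eq_B (tok : String) (unpackers : List (String × String)) (l : List String) :
    pvMatchA tok unpackers l = pvMatchB tok unpackers (l.map PySem.Str.lower) := by
  induction l with
  | nil => simp [pvMatchA, pvMatchB]
  | cons a l ih =>
    simp only [List.map_cons, pvMatchA, pvMatchB]
    split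
    · rfl
    · exact ih

theorem pvLoopA_eq_emit (unpackers : List (String × String)) (toks : List String) :
    pvLoopA unpackers toks
      = (toks.zip (toks.drop 1 ++ [""])).filterMap
          (fun p => pvItemB p.1 p.2 ((pvSortedSuffixes unpackers).map PySem.Str.lower) unpackers) := by
  induction toks with
  | nil => simp [pvLoopA]
  | cons t rest ih =>
    have hz : (t :: rest).zip ((t :: rest).drop 1 ++ [""])
        = (t, rest.headD "") :: rest.zip (rest.drop 1 ++ [""]) := by
      cases rest <;> simp
    rw [hz, List.filterMap_cons, pvLoopA]
    by_cases h1 : (pvEndsQ t || t == "(" || t == ")") = true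
    · have hb : pvItemB t (rest.headD "") ((pvSortedSuffixes unpackers).map PySem.Str.lower)
          unpackers = some t := by
        unfold pvItemB; rw [if_pos h1]
      rw [if_pos h1, hb, ih]
    · have harrow : (rest.head? == some "->" || t == "->")
          = (t == "->" || rest.headD "" == "->") := by
        cases rest with
        | nil => simp [Bool.or_comm]
        | cons a r => simp [Bool.or_comm]
      rw [if_neg h1]
      by_cases h2 : (rest.head? == some "->" || t == "->") = true
      · have hb : pvItemB t (rest.headD "") ((pvSortedSuffixes unpackers).map PySem.Str.lower)
            unpackers = none := by
          unfold pvItemB; rw [if_neg h1, if_pos (by rw [← harrow]; exact h2)]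
        rw [if_pos h2, hb, ih]
      · have hb : pvItemB t (rest.headD "") ((pvSortedSuffixes unpackers).map PySem.Str.lower)
            unpackers = pvMatchA t unpackers (pvSortedSuffixes unpackers) := by
          unfold pvItemB
          rw [if_neg h1, if_neg (by rw [← harrow]; exact h2), ← pvMatchA_eq_B]
        rw [if_neg h2, hb]
        cases hm : pvMatchA t unpackers (pvSortedSuffixes unpackers) with
        | none => rw [ih]
        | some d => rw [ih]

theorem pvGetD_safe (unpackers : List (String × String)) (s : String)
    (hs : ∀ v : String, (s, v) ∈ unpackers → pvSafeVal v = true) :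
    pvEndsQ (PySem.Dict.getD (PySem.Dict.mk unpackers) s "") = false := by
  rw [PySem.Dict.getD_eq_get?_getD]
  cases hg : PySem.Dict.get? (PySem.Dict.mk unpackers) s with
  | none => simp [Option.getD]; decide
  | some v =>
    have hm := PySem.Dict.mem_items_of_get?_eq_some _ hg
    have hmem : (s, v) ∈ unpackers := hm
    have := hs v hmem
    simp only [pvSafeVal] at this
    have hq := Bool.and_elim_right this
    simp only [Option.getD]
    simpa using hq

theorem pvMatchA_notq {tok d : String} {unpackers : List (String × String)}
    (hsafe : ∀ k v : String, (k, v) ∈ unpackers →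
      PySem.Str.endswith (PySem.Str.lower tok) k = true → pvSafeVal v = true) :
    ∀ l : List String, pvMatchA tok unpackers l = some d → pvEndsQ d = false := by
  intro l
  induction l with
  | nil => intro h; simp [pvMatchA] at h
  | cons a l ih =>
    intro h
    simp only [pvMatchA] at h
    split at h
    · have hd : PySem.Dict.getD (PySem.Dict.mk unpackers) (PySem.Str.lower a) "" = d :=
        Option.some.inj h
      rw [← hd]
      refine pvGetD_safe unpackers _ (fun v hmem => hsafe _ v hmem ?_)
      assumption
    · exact ih h

theorem pvLoopA_qF (unpackers : List (String × String)) (toks : List String)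
    (hq : pvQF toks = true)
    (hv : ∀ k v : String, (k, v) ∈ unpackers → ∀ t ∈ toks,
      PySem.Str.endswith (PySem.Str.lower t) k = true → pvSafeVal v = true) :
    pvQF (pvLoopA unpackers toks) = true := by
  induction toks with
  | nil => simpa [pvLoopA] using hq
  | cons t rest ih =>
    have hrest := pvQF_tail hq
    have hvrest : ∀ k v : String, (k, v) ∈ unpackers → ∀ t' ∈ rest,
        PySem.Str.endswith (PySem.Str.lower t') k = true → pvSafeVal v = true :=
      fun k v hm t' ht' => hv k v hm t' (List.mem_cons_of_mem _ ht')
    rw [pvLoopA]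
    by_cases h1 : (pvEndsQ t || t == "(" || t == ")") = true
    · rw [if_pos h1]
      by_cases hqt : pvEndsQ t = true
      · have hh := pvQF_head_q hq hqt
        cases rest with
        | nil => simp at hh
        | cons a rest2 =>
          obtain rfl : a = "(" := by simpa using hh
          have hexp : pvLoopA unpackers ("(" :: rest2) = "(" :: pvLoopA unpackers rest2 := by
            rw [pvLoopA, if_pos (by simp)]
          rw [hexp, pvQF]
          have h2 := ih hrest hvrest
          rw [hexp] at h2
          simp [h2]
      · have hqt' : pvEndsQ t = false := by simpa using hqt
        rw [pvQF_cons_notq hqt']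
        exact ih hrest hvrest
    · rw [if_neg h1]
      by_cases h2 : (rest.head? == some "->" || t == "->") = true
      · rw [if_pos h2]; exact ih hrest hvrest
      · rw [if_neg h2]
        cases hm : pvMatchA t unpackers (pvSortedSuffixes unpackers) with
        | none => exact ih hrest hvrest
        | some d =>
          have hsafe : ∀ k v : String, (k, v) ∈ unpackers →
              PySem.Str.endswith (PySem.Str.lower t) k = true → pvSafeVal v = true :=
            fun k v hmem hk => hv k v hmem t (List.mem_cons_self) hk
          rw [pvQF_cons_notq (pvMatchA_notq hsafe _ hm)]
          exact ih hrest hvrest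

theorem extract_unpack_dependencies_spec : Claim_equal_extract_unpack_dependencies := by
  unfold Claim_equal_extract_unpack_dependencies
  intro src_uri unpackers _ hpre
  obtain ⟨hq, hbal, hvall, hk⟩ := hpre
  have hv : ∀ k v : String, (k, v) ∈ unpackers → ∀ t ∈ PySem.Str.split₀ src_uri,
      PySem.Str.endswith (PySem.Str.lower t) k = true → pvSafeVal v = true := by
    intro k v hm t ht he
    have := List.all_eq_true.mp hvall _ hm
    rcases Bool.eq_false_or_eq_true
        ((PySem.Str.split₀ src_uri).any (fun t => PySem.Str.endswith (PySem.Str.lower t) k))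
      with hany | hany
    · rw [hany] at this; simpa using this
    · exfalso
      have hf : PySem.Str.endswith (PySem.Str.lower t) k = false := by
        have := List.any_eq_false.mp (by simpa using hany) t ht
        simpa using this
      rw [he] at hf; simp at hf
  unfold Spec_extract_unpack_dependencies
  unfold extract_unpack_dependencies extract_unpack_dependencies_alt
  show PySem.Str.join " " (pvCleanA (pvLoopA unpackers (PySem.Str.split₀ src_uri)))
      = PySem.Str.join " "
        (((PySem.Str.split₀ src_uri).zip ((PySem.Str.split₀ src_uri).drop 1 ++ [""])).foldl
          (pvStepB ((PySem.List.sorted (PySem.Dict.keys (PySem.Dict.mk unpackers))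
            (fun x => PySem.Str.len x) true).map PySem.Str.lower) unpackers) [])
  rw [foldl_stepB_filterMap]
  rw [show (PySem.List.sorted (PySem.Dict.keys (PySem.Dict.mk unpackers))
      (fun x => PySem.Str.len x) true) = pvSortedSuffixes unpackers from rfl]
  rw [← pvLoopA_eq_emit]
  rw [pvCleanA_eq_stack _ (pvLoopA_qF unpackers (PySem.Str.split₀ src_uri) hq hv)]
  rw [foldl_stackStep_rev]
  simp
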